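-- pv_equiv track=rewrite | github.com/envomp/2018-Introduction-to-Programming | ex09_recursive_calories/recursive_calories.py | go_recc
-- ===== SOURCE A (Python) =====
-- def go_recc(items, a):
--     if a == 1000:
--         return items
--
--     temp = []
--     for i in range(a):
--         temp.append(i)
--     items.append(temp)
--     return go_recc(items,a-1)
-- ===== SOURCE B (Python) =====
-- def ranges_down_to_1000(a):
--     # [list(range(x)) for x = a, a-1, ..., 1001], built by recursion that
--     # peels two levels per call (half the recursion depth of one-at-a-time).
--     if a == 1000:
--         return []
--     if a - 1 == 1000:
--         return [list(range(a))]
--     return [list(range(a)), list(range(a - 1))] + ranges_down_to_1000(a - 2)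
--
--
-- def go_recc(items, a):
--     items.extend(ranges_down_to_1000(a))
--     return items
-- ===== Notes on version B (the rewrite author's own statement) =====
-- stated objective: alternative
-- what changed: Replaces A's accumulator-passing tail recursion (with a hand-written append loop building each range) by a pure recursive helper that builds the list of ranges two levels per call and one items.extend splice.
import Mathlib
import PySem

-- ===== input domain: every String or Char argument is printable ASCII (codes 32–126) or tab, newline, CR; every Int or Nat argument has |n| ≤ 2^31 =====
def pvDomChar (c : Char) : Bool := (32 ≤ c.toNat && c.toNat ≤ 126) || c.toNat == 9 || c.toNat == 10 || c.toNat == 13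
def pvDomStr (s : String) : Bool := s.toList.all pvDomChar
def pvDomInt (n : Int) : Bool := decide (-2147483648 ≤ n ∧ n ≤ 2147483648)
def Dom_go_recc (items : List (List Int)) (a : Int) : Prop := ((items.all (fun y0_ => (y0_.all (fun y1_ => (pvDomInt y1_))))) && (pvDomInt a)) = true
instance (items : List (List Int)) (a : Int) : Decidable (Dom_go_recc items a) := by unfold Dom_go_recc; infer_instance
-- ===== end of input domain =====

-- B replaces A's accumulator-passing tail recursion by a pure recursive helper building the
-- list of ranges (two levels per call) plus one extend; same cost, a different decomposition.
-- A mutates `items` in place (appends to it); B performs the same mutation (one extend), and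
-- the equivalence proved here is about the RETURN value.

-- ===== PORT A =====
-- A's recursion terminates only for a ≥ 1000; for a < 1000 Python recurses forever until
-- RecursionError — that branch is outside Pre_go_recc, and the `a < 1000` guard here only
-- makes the same computation total (the port returns a junk value there).
def go_recc (items : List (List Int)) (a : Int) : List (List Int) :=
  if a = 1000 then items
  else
    -- temp = []; for i in range(a): temp.append(i)
    let temp := (PySem.List.pyRange 0 a 1).foldl (fun t i => t ++ [i]) []
    if _h : a < 1000 then items ++ [temp]   -- unreachable under Pre_ (Python raises here)
    else go_recc (items ++ [temp]) (a - 1)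
termination_by (a - 1000).toNat
decreasing_by omega

-- ===== PORT B =====
-- ranges_down_to_1000: [list(range(x)) for x = a, a-1, ..., 1001], two levels per call.
-- For a < 1000 the Python helper recurses until RecursionError (outside Pre_go_recc); the
-- `a < 1000` guard here only makes the same computation total (junk value there).
def ranges_down_to_1000 (a : Int) : List (List Int) :=
  if a = 1000 then []
  else if a - 1 = 1000 then [PySem.List.pyRange 0 a 1]
  else if _h : a < 1000 then [PySem.List.pyRange 0 a 1]   -- unreachable under Pre_
  else [PySem.List.pyRange 0 a 1, PySem.List.pyRange 0 (a - 1) 1] ++ ranges_down_to_1000 (a - 2)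
termination_by (a - 1000).toNat
decreasing_by omega

def go_recc_alt (items : List (List Int)) (a : Int) : List (List Int) :=
  items ++ ranges_down_to_1000 a

-- ===== PRECONDITION & SPEC =====
-- A returns only for a ≥ 1000; for a < 1000 it recurses forever (RecursionError).
def Pre_go_recc (items : List (List Int)) (a : Int) : Prop := 1000 ≤ a
instance (items : List (List Int)) (a : Int) : Decidable (Pre_go_recc items a) := by unfold Pre_go_recc; infer_instance
def pvWitness_go_recc : List (List Int) × Int := ([[3]], 1002)

def Spec_go_recc (items : List (List Int)) (a : Int) (out : List (List Int)) : Prop := out = go_recc_alt items a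
instance (items : List (List Int)) (a : Int) (out : List (List Int)) : Decidable (Spec_go_recc items a out) := by unfold Spec_go_recc; infer_instance

-- ===== CLAIM (what is proved, stated in full; the proofs are below) =====
def Claim_equal_go_recc : Prop := ∀ (items : List (List Int)) (a : Int), Dom_go_recc items a → Pre_go_recc items a → Spec_go_recc items a (go_recc items a)

-- ===== LEMMAS AND PROOFS =====

theorem foldl_append_singleton (l : List Int) (acc : List Int) :
    l.foldl (fun t i => t ++ [i]) acc = acc ++ l := by
  induction l generalizing acc with
  | nil => simp
  | cons x xs ih => simp [List.foldl, ih]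

-- B's two-at-a-time helper satisfies the one-step unfolding A's recursion follows.
theorem ranges_down_cons (a : Int) (h : 1000 < a) :
    ranges_down_to_1000 a = PySem.List.pyRange 0 a 1 :: ranges_down_to_1000 (a - 1) := by
  induction hk : (a - 1000).toNat using Nat.strong_induction_on generalizing a with
  | _ n ih =>
    by_cases h1 : a = 1001
    · subst h1
      rw [ranges_down_to_1000, if_neg (by omega), if_pos (by omega)]
      rw [show (1001:Int) - 1 = 1000 from rfl, ranges_down_to_1000, if_pos rfl]
    · have h2 : 1002 ≤ a := by omega
      rw [ranges_down_to_1000, if_neg (by omega), if_neg (by omega), dif_neg (by omega)]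
      rw [ih ((a - 1) - 1000).toNat (by omega) (a - 1) (by omega) rfl]
      rw [show a - 1 - 1 = a - 2 by ring]
      rfl

theorem go_recc_eq_alt (a : Int) (h : 1000 ≤ a) :
    ∀ (items : List (List Int)), go_recc items a = go_recc_alt items a := by
  induction hk : (a - 1000).toNat generalizing a with
  | zero =>
    intro items
    have ha : a = 1000 := by omega
    subst ha
    rw [go_recc, if_pos rfl]
    rw [go_recc_alt, ranges_down_to_1000, if_pos rfl, List.append_nil]
  | succ n ih =>
    intro items
    have ha : 1000 < a := by omega
    rw [go_recc, if_neg (by omega), dif_neg (by omega)]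
    rw [ih (a - 1) (by omega) (by omega)]
    unfold go_recc_alt
    rw [ranges_down_cons a ha, foldl_append_singleton, List.nil_append]
    simp

-- ===== VERDICT (by name: the statement is the Claim_ definition above) =====
theorem go_recc_spec : Claim_equal_go_recc := by
  intro items a _ hpre
  unfold Spec_go_recc
  exact go_recc_eq_alt a hpre items
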